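-- pv_equiv track=rewrite | github.com/bhumikamittal7/NTT | minusOne/recursiveCT.py | convertToNTT_butterfly
-- ===== SOURCE A (Python) =====
-- def convertToNTT_butterfly(f, w, q):
--     n = len(f)
--     if n == 1:
--         return f
--     else:
--         r_1 = []
--         r_2 = []
--         for i in range(n//2):
--             r_1.append((f[i] + f[i+n//2]) % q)
--             r_2.append((f[i] - f[i+n//2]) * pow(w, i, q) % q)
--
--         # print ("r_1 = ",r_1)
--         # print ("r_2 = ",r_2)
--         r_1 = convertToNTT_butterfly(r_1, (w**2)%q, q)
--         r_2 = convertToNTT_butterfly(r_2, (w**2)%q, q)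
--         r = r_1 + r_2
--         return r
-- ===== SOURCE B (Python) =====
-- def convertToNTT_butterfly(f, w, q):
--     # iterative breadth-first level loop over an explicit worklist of blocks,
--     # running twiddle instead of pow(w, i, q)
--     blocks = [f]
--     while len(blocks[0]) >= 2:
--         nxt = []
--         for b in blocks:
--             h = len(b) // 2
--             sums, diffs, wi = [], [], 1 % q
--             for i in range(h):
--                 sums.append((b[i] + b[i + h]) % q)
--                 diffs.append((b[i] - b[i + h]) * wi % q)
--                 wi = wi * w % q
--             nxt.append(sums)
--             nxt.append(diffs)
--         blocks = nxt
--         w = w * w % q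
--     out = []
--     for b in blocks:
--         out += b
--     return out
-- ===== Notes on version B (the rewrite author's own statement) =====
-- stated objective: faster
-- what changed: An iterative breadth-first while-loop over an explicit worklist of blocks replaces A's depth-first recursion, and each level maintains a running twiddle w^i by one modular multiplication per butterfly instead of calling pow(w, i, q).
import Mathlib
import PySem

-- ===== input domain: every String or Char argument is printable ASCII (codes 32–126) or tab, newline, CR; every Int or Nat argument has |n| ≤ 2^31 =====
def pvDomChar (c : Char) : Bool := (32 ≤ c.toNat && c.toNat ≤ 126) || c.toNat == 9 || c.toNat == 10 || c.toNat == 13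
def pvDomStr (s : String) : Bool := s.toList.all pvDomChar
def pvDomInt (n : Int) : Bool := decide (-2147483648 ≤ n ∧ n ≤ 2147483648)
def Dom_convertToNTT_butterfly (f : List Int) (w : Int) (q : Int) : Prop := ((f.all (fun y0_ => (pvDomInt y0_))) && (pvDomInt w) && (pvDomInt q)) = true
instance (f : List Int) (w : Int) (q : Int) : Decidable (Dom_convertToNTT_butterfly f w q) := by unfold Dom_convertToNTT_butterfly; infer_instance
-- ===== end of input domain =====

-- B replaces A's depth-first recursion by an iterative breadth-first loop over an explicit
-- worklist of blocks, maintaining a running twiddle by one modular multiplication per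
-- butterfly instead of pow(w, i, q) (objective: faster).

-- ===== PORT A =====
-- fuel = f.length bounds the recursion depth (the recursion halves the length each level);
-- it only changes the value at f = [], where the Python A recurses forever (outside Pre_).
def convertToNTT_butterfly_go : Nat → List Int → Int → Int → List Int
  | 0, f, _, _ => f
  | fuel+1, f, w, q =>
    let n := f.length
    if n = 1 then f
    else
      let p := (List.range (n/2)).foldl
        (fun (r : List Int × List Int) (i : Nat) =>
          (r.1 ++ [PySem.Int.mod (PySem.List.pyGetD f (↑i) 0 + PySem.List.pyGetD f (↑i + PySem.Int.floordiv (↑n) 2) 0) q],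
           r.2 ++ [PySem.Int.mod ((PySem.List.pyGetD f (↑i) 0 - PySem.List.pyGetD f (↑i + PySem.Int.floordiv (↑n) 2) 0) * PySem.Int.powMod w i q) q]))
        ([], [])
      convertToNTT_butterfly_go fuel p.1 (PySem.Int.mod (w^2) q) q
        ++ convertToNTT_butterfly_go fuel p.2 (PySem.Int.mod (w^2) q) q

def convertToNTT_butterfly (f : List Int) (w : Int) (q : Int) : List Int :=
  convertToNTT_butterfly_go f.length f w q

-- ===== PORT B =====
-- one breadth-first butterfly level applied to every block of the worklist
def pvAltLevel (blocks : List (List Int)) (w q : Int) : List (List Int) :=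
  blocks.foldl
    (fun nxt b =>
      let h := b.length / 2
      let st := (List.range h).foldl
        (fun (st : List Int × List Int × Int) (i : Nat) =>
          (st.1 ++ [PySem.Int.mod (PySem.List.pyGetD b (↑i) 0 + PySem.List.pyGetD b (↑(i + h)) 0) q],
           st.2.1 ++ [PySem.Int.mod ((PySem.List.pyGetD b (↑i) 0 - PySem.List.pyGetD b (↑(i + h)) 0) * st.2.2) q],
           PySem.Int.mod (st.2.2 * w) q))
        ([], [], PySem.Int.mod 1 q)
      nxt ++ [st.1, st.2.1])
    []

-- the 'while len(blocks[0]) >= 2' loop; blocks is never empty in B, so headD [] is exact.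
-- fuel = f.length bounds the number of levels (the block length halves each level).
def pvAltLoop : Nat → List (List Int) → Int → Int → List (List Int)
  | 0, blocks, _, _ => blocks
  | fuel+1, blocks, w, q =>
    if 2 ≤ (blocks.headD []).length then
      pvAltLoop fuel (pvAltLevel blocks w q) (PySem.Int.mod (w * w) q) q
    else blocks

def convertToNTT_butterfly_alt (f : List Int) (w : Int) (q : Int) : List Int :=
  (pvAltLoop f.length [f] w q).foldl (fun out b => out ++ b) []

-- ===== PRECONDITION & SPEC =====
-- Pre_ excludes exactly the inputs where the Python A raises: f = [] (unbounded recursion,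
-- RecursionError) and q = 0 with 2 ≤ len(f) (pow/% with modulus 0).
def Pre_convertToNTT_butterfly (f : List Int) (w : Int) (q : Int) : Prop :=
  f ≠ [] ∧ (f.length = 1 ∨ q ≠ 0)
instance (f : List Int) (w : Int) (q : Int) : Decidable (Pre_convertToNTT_butterfly f w q) := by
  unfold Pre_convertToNTT_butterfly; infer_instance

def pvWitness_convertToNTT_butterfly : List Int × Int × Int := ([1, 2, 3, 4], 2, 5)

def Spec_convertToNTT_butterfly (f : List Int) (w : Int) (q : Int) (out : List Int) : Prop := out = convertToNTT_butterfly_alt f w q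
instance (f : List Int) (w : Int) (q : Int) (out : List Int) : Decidable (Spec_convertToNTT_butterfly f w q out) := by unfold Spec_convertToNTT_butterfly; infer_instance

-- ===== CLAIM (what is proved, stated in full; the proofs are below) =====
def Claim_equal_convertToNTT_butterfly : Prop := ∀ (f : List Int) (w : Int) (q : Int), Dom_convertToNTT_butterfly f w q → Pre_convertToNTT_butterfly f w q → Spec_convertToNTT_butterfly f w q (convertToNTT_butterfly f w q)

-- ===== LEMMAS AND PROOFS =====

-- (x % q * w) % q = (x * w) % q for Python's floor-mod.
lemma pv_fmod_mul (x w q : Int) : ((x.fmod q) * w).fmod q = (x * w).fmod q := by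
  have h1 : (x.fmod q) * w = x * w + q * (-(x.fdiv q * w)) := by
    rw [Int.fmod_def]; ring
  rw [h1, Int.add_mul_fmod_self_left]

-- B's inner single-pass fold with a running twiddle, characterised.
lemma pv_alt_fold (b : List Int) (h : Nat) (w q : Int) :
    ∀ (k i : Nat) (r1 r2 : List Int),
    List.foldl
      (fun (st : List Int × List Int × Int) (j : Nat) =>
        (st.1 ++ [PySem.Int.mod (PySem.List.pyGetD b (↑j) 0 + PySem.List.pyGetD b (↑(j + h)) 0) q],
         st.2.1 ++ [PySem.Int.mod ((PySem.List.pyGetD b (↑j) 0 - PySem.List.pyGetD b (↑(j + h)) 0) * st.2.2) q],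
         PySem.Int.mod (st.2.2 * w) q))
      (r1, r2, PySem.Int.mod (w ^ i) q) (List.range' i k)
    = (r1 ++ (List.range' i k).map (fun (j : Nat) => PySem.Int.mod (PySem.List.pyGetD b (↑j) 0 + PySem.List.pyGetD b (↑(j + h)) 0) q),
       r2 ++ (List.range' i k).map (fun (j : Nat) => PySem.Int.mod ((PySem.List.pyGetD b (↑j) 0 - PySem.List.pyGetD b (↑(j + h)) 0) * PySem.Int.mod (w ^ j) q) q),
       PySem.Int.mod (w ^ (i + k)) q) := by
  intro k
  induction k with
  | zero => intro i r1 r2; simp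
  | succ k ih =>
    intro i r1 r2
    rw [List.range'_succ]
    have hstep : PySem.Int.mod (PySem.Int.mod (w ^ i) q * w) q = PySem.Int.mod (w ^ (i + 1)) q := by
      simp only [PySem.Int.mod, pv_fmod_mul, pow_succ]
    simp only [List.foldl_cons, List.map_cons, hstep, ih (i + 1)]
    simp [Nat.add_comm, Nat.add_left_comm]

-- 'out += b' over a list of blocks is flatten.
lemma pv_foldl_flat (l : List (List Int)) : ∀ acc : List Int,
    l.foldl (fun out b => out ++ b) acc = acc ++ l.flatten := by
  induction l with
  | nil => intro acc; simp
  | cons b t ih => intro acc; simp [ih, List.append_assoc]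

-- one breadth-first level = per-block sums/diffs, with the running twiddle resolved to w^j mod q.
def pvSums (b : List Int) (q : Int) : List Int :=
  (List.range' 0 (b.length / 2)).map
    (fun (j : Nat) => PySem.Int.mod (PySem.List.pyGetD b (↑j) 0 + PySem.List.pyGetD b (↑(j + b.length / 2)) 0) q)
def pvDiffs (b : List Int) (w q : Int) : List Int :=
  (List.range' 0 (b.length / 2)).map
    (fun (j : Nat) => PySem.Int.mod ((PySem.List.pyGetD b (↑j) 0 - PySem.List.pyGetD b (↑(j + b.length / 2)) 0) * PySem.Int.mod (w ^ j) q) q)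

lemma pv_level_eq (blocks : List (List Int)) (w q : Int) :
    pvAltLevel blocks w q = blocks.flatMap (fun b => [pvSums b q, pvDiffs b w q]) := by
  unfold pvAltLevel
  have hfun : (fun (nxt : List (List Int)) (b : List Int) =>
      let h := b.length / 2
      let st := (List.range h).foldl
        (fun (st : List Int × List Int × Int) (i : Nat) =>
          (st.1 ++ [PySem.Int.mod (PySem.List.pyGetD b (↑i) 0 + PySem.List.pyGetD b (↑(i + h)) 0) q],
           st.2.1 ++ [PySem.Int.mod ((PySem.List.pyGetD b (↑i) 0 - PySem.List.pyGetD b (↑(i + h)) 0) * st.2.2) q],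
           PySem.Int.mod (st.2.2 * w) q))
        ([], [], PySem.Int.mod 1 q)
      nxt ++ [st.1, st.2.1])
      = fun (nxt : List (List Int)) (b : List Int) => nxt ++ [pvSums b q, pvDiffs b w q] := by
    funext nxt b
    show nxt ++ _ = _
    have h1 : PySem.Int.mod 1 q = PySem.Int.mod (w ^ 0) q := by simp
    rw [List.range_eq_range', h1, pv_alt_fold b (b.length / 2) w q (b.length / 2) 0 [] []]
    simp [pvSums, pvDiffs]
  rw [hfun, PySem.List.foldl_append_eq_flatMap]
  simp

-- A's per-level fold builds exactly the same two lists.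
lemma pv_a_level (b : List Int) (w q : Int) :
    (List.range (b.length / 2)).foldl
      (fun (r : List Int × List Int) (i : Nat) =>
        (r.1 ++ [PySem.Int.mod (PySem.List.pyGetD b (↑i) 0 + PySem.List.pyGetD b (↑i + PySem.Int.floordiv (↑b.length) 2) 0) q],
         r.2 ++ [PySem.Int.mod ((PySem.List.pyGetD b (↑i) 0 - PySem.List.pyGetD b (↑i + PySem.Int.floordiv (↑b.length) 2) 0) * PySem.Int.powMod w i q) q]))
      ([], [])
    = (pvSums b q, pvDiffs b w q) := by
  rw [PySem.List.foldl_prod_mk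
    (f := fun (r1 : List Int) (i : Nat) => r1 ++ [PySem.Int.mod (PySem.List.pyGetD b (↑i) 0 + PySem.List.pyGetD b (↑i + PySem.Int.floordiv (↑b.length) 2) 0) q])
    (g := fun (r2 : List Int) (i : Nat) => r2 ++ [PySem.Int.mod ((PySem.List.pyGetD b (↑i) 0 - PySem.List.pyGetD b (↑i + PySem.Int.floordiv (↑b.length) 2) 0) * PySem.Int.powMod w i q) q])]
  rw [PySem.List.foldl_append_singleton_eq_map, PySem.List.foldl_append_singleton_eq_map]
  have hidx : ∀ i : Nat, ((i : Int) + PySem.Int.floordiv (↑b.length) 2) = ((i + b.length / 2 : Nat) : Int) := by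
    intro i
    have : PySem.Int.floordiv (↑b.length) 2 = ((b.length / 2 : Nat) : Int) := by
      rw [PySem.Int.floordiv_eq_ediv_of_pos (by omega)]; omega
    rw [this]; push_cast; ring
  simp only [Prod.mk.injEq]
  constructor <;>
  · simp only [pvSums, pvDiffs, List.range_eq_range', List.nil_append]
    apply List.map_congr_left
    intro i _
    first
      | (rw [hidx i]; rfl)
      | rw [hidx i]

-- flatten/map algebra for one split level
lemma pv_flat_pair (l : List (List Int)) (S D g : List Int → List Int) :
    ((l.flatMap (fun b => [S b, D b])).map g).flatten
      = (l.map (fun b => g (S b) ++ g (D b))).flatten := by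
  induction l with
  | nil => simp
  | cons b t ih => simp [ih]

-- The breadth-first worklist loop equals the depth-first recursion, block by block.
lemma pv_main (fuel : Nat) : ∀ (blocks : List (List Int)) (m : Nat) (w q : Int),
    q ≠ 0 → 1 ≤ m → m ≤ fuel → (∀ b ∈ blocks, b.length = m) →
    (pvAltLoop fuel blocks w q).flatten
      = (blocks.map (fun b => convertToNTT_butterfly_go fuel b w q)).flatten := by
  induction fuel with
  | zero => intro blocks m w q _ h1 h2 _; omega
  | succ fuel ih =>
    intro blocks m w q hq h1 hle hlen
    cases blocks with
    | nil => simp [pvAltLoop]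
    | cons b0 t =>
      by_cases hm : m = 1
      · have hhead : ¬ 2 ≤ ((b0 :: t).headD []).length := by
          have := hlen b0 (by simp); simp [this, hm]
        rw [pvAltLoop, if_neg hhead]
        congr 1
        conv_lhs => rw [← List.map_id (b0 :: t)]
        apply List.map_congr_left
        intro b hb
        have hb1 := hlen b hb
        rw [convertToNTT_butterfly_go]
        simp [hb1, hm]
      · have hm2 : 2 ≤ m := by omega
        have hb0 := hlen b0 (by simp)
        have hhead : 2 ≤ ((b0 :: t).headD []).length := by simp [hb0]; omega
        rw [pvAltLoop, if_pos hhead, pv_level_eq]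
        have hlens : ∀ c ∈ (b0 :: t).flatMap (fun b => [pvSums b q, pvDiffs b w q]),
            c.length = m / 2 := by
          intro c hc
          rcases List.mem_flatMap.mp hc with ⟨b, hb, hc2⟩
          have hbl := hlen b hb
          simp only [List.mem_cons, List.not_mem_nil, or_false] at hc2
          rcases hc2 with rfl | rfl <;> simp [pvSums, pvDiffs, hbl]
        rw [ih _ (m / 2) (PySem.Int.mod (w * w) q) q hq (by omega) (by omega) hlens]
        rw [pv_flat_pair]
        congr 1
        apply List.map_congr_left
        intro b hb
        have hbl := hlen b hb
        have hb1 : ¬ b.length = 1 := by omega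
        simp only [convertToNTT_butterfly_go]
        rw [if_neg hb1, pv_a_level b w q]
        have hw2 : PySem.Int.mod (w ^ 2) q = PySem.Int.mod (w * w) q := by rw [sq]
        rw [hw2]

-- ===== VERDICT (by name: the statement is the Claim_ definition above) =====
theorem convertToNTT_butterfly_spec : Claim_equal_convertToNTT_butterfly := by
  intro f w q _hdom hpre
  obtain ⟨hne, hq⟩ := hpre
  have h1 : 1 ≤ f.length := by
    cases f with
    | nil => exact absurd rfl hne
    | cons a t => simp
  unfold Spec_convertToNTT_butterfly convertToNTT_butterfly convertToNTT_butterfly_alt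
  rw [pv_foldl_flat, List.nil_append]
  rcases hq with hq | hq
  · -- length 1: both sides return f itself, whatever q is
    cases f with
    | nil => exact absurd rfl hne
    | cons a t =>
      have ht : t = [] := by simpa using hq
      subst ht
      simp [pvAltLoop, convertToNTT_butterfly_go]
  · have := pv_main f.length [f] f.length w q hq h1 (le_refl _) (by simp)
    rw [this]
    simp
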